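-- pv_equiv track=rewrite | github.com/WilliamQ28/Pain | P2/render_html.py | lorem_for_chars
-- ===== SOURCE A (Python) =====
-- from typing import Dict, List, Tuple, Optional, Any
--
-- LOREM = (
--     "Lorem ipsum dolor sit amet, consectetur adipiscing elit. Sed do eiusmod tempor "
--     "incididunt ut labore et dolore magna aliqua. Ut enim ad minim veniam."
-- )
--
-- LOREM_WORDS = LOREM.split()
--
-- def lorem_for_chars(char_capacity: Optional[int]) -> str:
--     if not char_capacity or char_capacity <= 0:
--         return LOREM
--     words = []
--     total = 0
--     idx = 0
--     while total < char_capacity: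
--         word = LOREM_WORDS[idx % len(LOREM_WORDS)]
--         words.append(word)
--         total += len(word) + 1
--         idx += 1
--     return " ".join(words)
-- ===== SOURCE B (Python) =====
-- from typing import Optional
--
-- LOREM = (
--     "Lorem ipsum dolor sit amet, consectetur adipiscing elit. Sed do eiusmod tempor "
--     "incididunt ut labore et dolore magna aliqua. Ut enim ad minim veniam."
-- )
--
-- LOREM_WORDS = LOREM.split()
--
-- _CYCLE = sum(len(w) + 1 for w in LOREM_WORDS)
--
-- _PREFIX = []
-- _acc = 0
-- for _w in LOREM_WORDS:
--     _acc += len(_w) + 1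
--     _PREFIX.append(_acc)
--
-- def lorem_for_chars(char_capacity: Optional[int]) -> str:
--     if not char_capacity or char_capacity <= 0:
--         return LOREM
--     full_cycles = (char_capacity - 1) // _CYCLE
--     rem = char_capacity - full_cycles * _CYCLE
--     n_extra = next(i + 1 for i, p in enumerate(_PREFIX) if p >= rem)
--     return " ".join(LOREM_WORDS * full_cycles + LOREM_WORDS[:n_extra])
-- ===== Notes on version B (the rewrite author's own statement) =====
-- stated objective: faster
-- what changed: Replaces A's word-by-word accumulation loop by closed-form arithmetic: whole lorem cycles are counted with one integer division by the precomputed cycle character sum, the partial tail cycle is found by scanning 24 precomputed prefix sums, and the result is built as LOREM_WORDS * full_cycles + a prefix slice.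
import Mathlib
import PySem

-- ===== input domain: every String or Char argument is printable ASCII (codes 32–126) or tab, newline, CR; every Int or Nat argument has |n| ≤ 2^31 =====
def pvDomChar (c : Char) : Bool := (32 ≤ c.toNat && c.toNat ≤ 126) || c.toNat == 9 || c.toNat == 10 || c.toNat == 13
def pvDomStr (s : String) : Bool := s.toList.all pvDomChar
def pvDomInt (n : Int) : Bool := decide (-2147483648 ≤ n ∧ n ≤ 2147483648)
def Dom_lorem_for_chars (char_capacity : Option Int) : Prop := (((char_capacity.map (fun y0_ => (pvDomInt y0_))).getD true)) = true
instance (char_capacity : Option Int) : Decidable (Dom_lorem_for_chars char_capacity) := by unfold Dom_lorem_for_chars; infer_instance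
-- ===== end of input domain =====

set_option maxRecDepth 100000


-- B replaces A's word-by-word while loop by closed-form arithmetic: whole cycles via
-- integer division by the cycle's character sum, the tail via a precomputed prefix-sum scan
-- (objective: faster for large capacities).

-- ===== PORT A =====
def pvLOREM : String :=
  "Lorem ipsum dolor sit amet, consectetur adipiscing elit. Sed do eiusmod tempor incididunt ut labore et dolore magna aliqua. Ut enim ad minim veniam."

def pvLOREM_WORDS : List String := PySem.Str.split₀ pvLOREM

-- the while loop of A: append LOREM_WORDS[idx % len] while total < cap
def loremLoop (cap total : Int) (idx : Nat) (words : List String) : List String :=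
  if _h : total < cap then
    loremLoop cap
      (total + (PySem.Str.len (pvLOREM_WORDS.getD (idx % pvLOREM_WORDS.length) "") + 1))
      (idx + 1)
      (words ++ [pvLOREM_WORDS.getD (idx % pvLOREM_WORDS.length) ""])
  else words
termination_by (cap - total).toNat
decreasing_by
  have h0 : 0 ≤ PySem.Str.len (pvLOREM_WORDS.getD (idx % pvLOREM_WORDS.length) "") := by
    simp [PySem.Str.len_eq]
  omega

def lorem_for_chars (char_capacity : Option Int) : String :=
  match char_capacity with
  | none => pvLOREM           -- `not char_capacity` is true for None
  | some c =>
    if c = 0 ∨ c ≤ 0 then pvLOREM   -- `not c or c <= 0`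
    else PySem.Str.join " " (loremLoop c 0 0 [])

-- ===== PORT B =====
-- cycle character sum: sum(len(w)+1 for w in LOREM_WORDS)
def pvCYCLE : Int := (pvLOREM_WORDS.map (fun w => PySem.Str.len w + 1)).sum

-- running prefix sums within one cycle (built by Source B's accumulator loop)
def pvPREFIX : List Int :=
  (pvLOREM_WORDS.foldl
    (fun (p : List Int × Int) w =>
      (p.1 ++ [p.2 + (PySem.Str.len w + 1)], p.2 + (PySem.Str.len w + 1)))
    ([], 0)).1

def lorem_for_chars_alt (char_capacity : Option Int) : String :=
  match char_capacity with
  | none => pvLOREM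
  | some c =>
    if c = 0 ∨ c ≤ 0 then pvLOREM
    else
      let full_cycles := PySem.Int.floordiv (c - 1) pvCYCLE
      let rem := c - full_cycles * pvCYCLE
      -- next(i+1 for i, p in enumerate(_PREFIX) if p >= rem)
      let n_extra := pvPREFIX.findIdx (fun p => decide (rem ≤ p)) + 1
      PySem.Str.join " "
        (PySem.List.pyRepeat pvLOREM_WORDS full_cycles ++ pvLOREM_WORDS.take n_extra)

-- ===== PRECONDITION & SPEC =====
def Spec_lorem_for_chars (char_capacity : Option Int) (out : String) : Prop := out = lorem_for_chars_alt char_capacity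
instance (char_capacity : Option Int) (out : String) : Decidable (Spec_lorem_for_chars char_capacity out) := by unfold Spec_lorem_for_chars; infer_instance

-- ===== CLAIM (what is proved, stated in full; the proofs are below) =====
def Claim_equal_lorem_for_chars : Prop := ∀ (char_capacity : Option Int), Dom_lorem_for_chars char_capacity → Spec_lorem_for_chars char_capacity (lorem_for_chars char_capacity)

-- ===== LEMMAS AND PROOFS =====

-- word lengths + 1, and their prefix sums, as concrete data
def pvD : List Nat := [6, 6, 6, 4, 6, 12, 11, 6, 4, 3, 8, 7, 11, 3, 7, 3, 7, 6, 8, 3, 5, 3, 6, 8]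
def pvdlen (i : Nat) : Nat := pvD.getD (i % 24) 0
def pvPn (j : Nat) : Nat := (pvD.take j).sum

-- number of loop iterations of A for remaining capacity r, starting at word index i
-- (structural fuel recursion; pvN supplies enough fuel since each step consumes ≥ 1 char)
def pvNF (fuel : Nat) (r : Int) (i : Nat) : Nat :=
  match fuel with
  | 0 => 0
  | fuel + 1 => if 0 < r then 1 + pvNF fuel (r - (pvdlen i : Int)) (i + 1) else 0

def pvN (r : Int) (i : Nat) : Nat := pvNF r.toNat r i

-- i-th word emitted by the loop when started at index 0
def pvf (i : Nat) : String := pvLOREM_WORDS.getD (i % 24) ""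

lemma pvLW_len : pvLOREM_WORDS.length = 24 := by decide

lemma pv_len_word (i : Nat) :
    PySem.Str.len (pvLOREM_WORDS.getD (i % 24) "") + 1 = (pvdlen i : Int) := by
  have hlt : i % 24 < 24 := Nat.mod_lt _ (by norm_num)
  have h : ∀ j < 24, PySem.Str.len (pvLOREM_WORDS.getD j "") + 1 = (pvD.getD j 0 : Int) := by decide
  exact h _ hlt

lemma pvdlen_pos (i : Nat) : 1 ≤ pvdlen i := by
  have hlt : i % 24 < 24 := Nat.mod_lt _ (by norm_num)
  have h : ∀ j < 24, 1 ≤ pvD.getD j 0 := by decide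
  exact h _ hlt

lemma pvNF_fuel : ∀ (fuel : Nat) (r : Int) (i : Nat), r.toNat ≤ fuel → pvNF fuel r i = pvNF r.toNat r i := by
  intro fuel
  induction fuel using Nat.strong_induction_on with
  | _ fuel ih =>
    cases fuel with
    | zero =>
      intro r i h
      have h0 : r.toNat = 0 := by omega
      rw [h0]
    | succ fuel =>
      intro r i h
      by_cases hr : 0 < r
      · have hd := pvdlen_pos i
        obtain ⟨m, hm⟩ : ∃ m, r.toNat = m + 1 := ⟨r.toNat - 1, by omega⟩
        rw [hm]
        simp only [pvNF, if_pos hr]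
        rw [ih fuel (by omega) _ _ (by omega), ih m (by omega) _ _ (by omega)]
      · have h0 : r.toNat = 0 := by omega
        rw [h0]
        simp [pvNF, hr]

lemma pvN_zero (r : Int) (i : Nat) (h : r ≤ 0) : pvN r i = 0 := by
  have hr : r.toNat = 0 := by omega
  simp [pvN, hr, pvNF]

lemma pvN_step (r : Int) (i : Nat) (h : 0 < r) :
    pvN r i = 1 + pvN (r - (pvdlen i : Int)) (i + 1) := by
  have hd := pvdlen_pos i
  obtain ⟨m, hm⟩ : ∃ m, r.toNat = m + 1 := ⟨r.toNat - 1, by omega⟩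
  unfold pvN
  rw [hm]
  simp only [pvNF, if_pos h]
  rw [pvNF_fuel m _ _ (by omega)]

-- (1) the loop emits exactly the first pvN words of the cyclic word stream
lemma pv_loom_char : ∀ (N : Nat) (cap total : Int) (idx : Nat) (acc : List String),
    (cap - total).toNat ≤ N →
    loremLoop cap total idx acc
      = acc ++ (List.range (pvN (cap - total) idx)).map (fun j => pvLOREM_WORDS.getD ((idx + j) % 24) "") := by
  intro N
  induction N with
  | zero =>
    intro cap total idx acc h
    have hlt : ¬ total < cap := by omega
    rw [loremLoop, dif_neg hlt, pvN_zero _ _ (by omega)]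
    simp
  | succ N ih =>
    intro cap total idx acc h
    by_cases hlt : total < cap
    · have h0 : 0 ≤ PySem.Str.len (pvLOREM_WORDS.getD (idx % 24) "") := by
        simp [PySem.Str.len_eq]
      have hlen := pv_len_word idx
      have hdp := pvdlen_pos idx
      rw [loremLoop, dif_pos hlt, pvLW_len, ih _ _ _ _ (by omega)]
      have harg : cap - (total + (PySem.Str.len (pvLOREM_WORDS.getD (idx % 24) "") + 1))
          = cap - total - (pvdlen idx : Int) := by
        rw [← pv_len_word idx]; ring
      rw [harg]
      have hpos : (0 : Int) < cap - total := by omega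
      conv_rhs => rw [pvN_step _ _ hpos, Nat.add_comm 1, List.range_succ_eq_map]
      simp only [List.map_cons, List.map_map, List.append_assoc, List.singleton_append]
      congr 2
      apply List.map_congr_left
      intro j _
      simp only [Function.comp_apply, Nat.succ_eq_add_one]
      rw [show idx + 1 + j = idx + (j + 1) from by omega]
    · rw [loremLoop, dif_neg hlt, pvN_zero _ _ (by omega)]
      simp

-- (2) pvN only depends on i modulo 24
lemma pvN_shift : ∀ (N : Nat) (r : Int) (i : Nat), r.toNat ≤ N → pvN r (i + 24) = pvN r i := by
  intro N
  induction N with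
  | zero => intro r i h; rw [pvN_zero _ _ (by omega), pvN_zero _ _ (by omega)]
  | succ N ih =>
    intro r i h
    by_cases hr : 0 < r
    · have hd : pvdlen (i + 24) = pvdlen i := by
        simp [pvdlen, Nat.add_mod_right]
      rw [pvN_step _ _ hr, pvN_step _ _ hr, hd,
          show i + 24 + 1 = (i + 1) + 24 by omega,
          ih _ _ (by have := pvdlen_pos i; omega)]
    · rw [pvN_zero _ _ (by omega), pvN_zero _ _ (by omega)]

lemma pvPn_succ : ∀ j < 24, pvPn (j + 1) = pvPn j + pvD.getD j 0 := by decide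
lemma pvPn_lt : ∀ j < 24, pvPn j < 149 := by decide

-- (4) stripping a full cycle
lemma pv_strip_aux : ∀ j ≤ 24, ∀ r : Int, 149 < r → pvN r 0 = j + pvN (r - (pvPn j : Int)) j := by
  intro j
  induction j with
  | zero => intro _ r _; simp [pvPn]
  | succ j ih =>
    intro hj r hr
    have hj' : j < 24 := by omega
    have hPn := pvPn_lt j hj'
    rw [ih (by omega) r hr, pvN_step _ _ (by omega)]
    have hmod : j % 24 = j := Nat.mod_eq_of_lt hj'
    have harg : r - (pvPn j : Int) - (pvdlen j : Int) = r - (pvPn (j + 1) : Int) := by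
      simp only [pvdlen, hmod]
      rw [pvPn_succ j hj']
      push_cast
      ring
    rw [harg]
    omega

lemma pv_strip (r : Int) (h : 149 < r) : pvN r 0 = 24 + pvN (r - 149) 0 := by
  have h24 := pv_strip_aux 24 (by omega) r h
  have hPn : (pvPn 24 : Int) = 149 := by decide
  rw [hPn] at h24
  rw [h24, show (24 : Nat) = 0 + 24 by omega, pvN_shift (r - 149).toNat _ _ (le_refl _)]

-- the tail word count B computes for a remaining capacity r ∈ [1, 149]
def pvK (r : Int) : Nat := pvPREFIX.findIdx (fun p => decide (r ≤ p)) + 1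

lemma pv_base : ∀ m : Nat, m < 149 → pvN ((m : Int) + 1) 0 = pvK ((m : Int) + 1) := by decide

lemma pvCYCLE_eq : pvCYCLE = 149 := by decide

lemma pvK_le (r : Int) (h : r ≤ 149) : pvK r ≤ 24 := by
  have hmem : (149 : Int) ∈ pvPREFIX := by decide
  have hlen : pvPREFIX.length = 24 := by decide
  have := List.findIdx_lt_length_of_exists (p := fun p => decide (r ≤ p)) (xs := pvPREFIX)
    ⟨149, hmem, by simpa using h⟩
  unfold pvK
  omega

lemma pv_pyRepeat (n : Int) :
    PySem.List.pyRepeat pvLOREM_WORDS n = (List.replicate n.toNat pvLOREM_WORDS).flatten := by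
  unfold PySem.List.pyRepeat; rfl

-- (8) the loop count equals B's closed form
lemma pv_main : ∀ (N : Nat) (r : Int), r.toNat ≤ N → 1 ≤ r →
    pvN r 0 = 24 * ((r - 1) / 149).toNat + pvK (r - ((r - 1) / 149) * 149) := by
  intro N
  induction N with
  | zero => intro r h h1; omega
  | succ N ih =>
    intro r hN h1
    by_cases hbig : 149 < r
    · rw [pv_strip r hbig, ih (r - 149) (by omega) (by omega)]
      have e1 : (r - 149 - 1) / 149 = (r - 1) / 149 - 1 := by omega
      have e2 : r - 149 - ((r - 149 - 1) / 149) * 149 = r - ((r - 1) / 149) * 149 := by omega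
      rw [e2, e1]
      have hq : 1 ≤ (r - 1) / 149 := by omega
      generalize pvK (r - ((r - 1) / 149) * 149) = K
      omega
    · have hq : (r - 1) / 149 = 0 := by omega
      rw [hq]
      simp only [Int.toNat_zero, Nat.mul_zero, Nat.zero_add, Int.zero_mul, Int.sub_zero]
      have hm : ((r - 1).toNat : Int) + 1 = r := by omega
      rw [← hm]
      exact pv_base _ (by omega)

lemma pv_take_base : ∀ k < 25, pvLOREM_WORDS.take k = (List.range k).map pvf := by decide
lemma pv_range24 : (List.range 24).map pvf = pvLOREM_WORDS := by decide

lemma pv_rep_take : ∀ (Q k : Nat), k ≤ 24 →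
    (List.replicate Q pvLOREM_WORDS).flatten ++ pvLOREM_WORDS.take k
      = (List.range (24 * Q + k)).map pvf := by
  intro Q
  induction Q with
  | zero =>
    intro k hk
    simp only [List.replicate_zero, List.flatten_nil, List.nil_append, Nat.mul_zero, Nat.zero_add]
    exact pv_take_base k (by omega)
  | succ Q ih =>
    intro k hk
    have hsplit : 24 * (Q + 1) + k = 24 + (24 * Q + k) := by ring
    rw [hsplit, List.range_add, List.map_append, List.map_map]
    have hper : (List.range (24 * Q + k)).map (pvf ∘ fun x => 24 + x)
        = (List.range (24 * Q + k)).map pvf := by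
      apply List.map_congr_left
      intro j _
      simp [pvf, Nat.add_mod_left]
    rw [hper, pv_range24, List.replicate_succ, List.flatten_cons, List.append_assoc, ih k hk]

-- ===== VERDICT (by name: the statement is the Claim_ definition above) =====
theorem lorem_for_chars_spec : Claim_equal_lorem_for_chars := by
  intro cc _hdom
  unfold Spec_lorem_for_chars
  match cc with
  | none => rfl
  | some c =>
    unfold lorem_for_chars lorem_for_chars_alt
    by_cases hc : c = 0 ∨ c ≤ 0
    · simp [hc]
    · simp only [if_neg hc]
      have h1 : 1 ≤ c := by omega
      rw [pvCYCLE_eq, PySem.Int.floordiv_eq_ediv_of_pos (by norm_num)]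
      have hq0 : 0 ≤ (c - 1) / 149 := by omega
      have hrem1 : 1 ≤ c - ((c - 1) / 149) * 149 := by omega
      have hrem2 : c - ((c - 1) / 149) * 149 ≤ 149 := by omega
      have hA : loremLoop c 0 0 []
          = (List.range (pvN c 0)).map pvf := by
        have := pv_loom_char c.toNat c 0 0 [] (by omega)
        rw [show c - 0 = c by ring] at this
        rw [this]
        simp only [List.nil_append]
        apply List.map_congr_left
        intro j _
        simp [pvf]
      rw [hA, pv_main c.toNat c (le_refl _) h1, pv_pyRepeat,
          show List.findIdx (fun p => decide ((c - ((c - 1) / 149) * 149) ≤ p)) pvPREFIX + 1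
            = pvK (c - ((c - 1) / 149) * 149) from rfl,
          pv_rep_take _ _ (pvK_le _ hrem2)]
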